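-- pv_equiv track=rewrite | github.com/ABakker30/ballpuzzle4 | ballpuzzle/test_dfs_simple.py | check_connectivity
-- ===== SOURCE A (Python) =====
-- def check_connectivity(cells):
--     """Check if cells form a connected component in FCC lattice."""
--     if len(cells) != 4:
--         return False
--
--     # FCC neighbors
--     neighbors = [
--         (1, 0, 0), (-1, 0, 0), (0, 1, 0), (0, -1, 0), (0, 0, 1), (0, 0, -1),
--         (1, -1, 0), (-1, 1, 0), (1, 0, -1), (-1, 0, 1), (0, 1, -1), (0, -1, 1)
--     ]
--     neighbor_set = set(neighbors)
--
--     pts = [tuple(map(int, c)) for c in cells]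
--
--     # Build adjacency graph
--     adj = {i: [] for i in range(4)}
--     for i in range(4):
--         for j in range(i + 1, 4):
--             dx = pts[j][0] - pts[i][0]
--             dy = pts[j][1] - pts[i][1]
--             dz = pts[j][2] - pts[i][2]
--             if (dx, dy, dz) in neighbor_set or (-dx, -dy, -dz) in neighbor_set:
--                 adj[i].append(j)
--                 adj[j].append(i)
--
--     # DFS to check connectivity
--     visited = {0}
--     stack = [0]
--     while stack:
--         node = stack.pop()
--         for neighbor in adj[node]:
--             if neighbor not in visited:
--                 visited.add(neighbor)
--                 stack.append(neighbor)
--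
--     return len(visited) == 4
-- ===== SOURCE B (Python) =====
-- def check_connectivity(cells):
--     """Check if cells form a connected component in FCC lattice."""
--     if len(cells) != 4:
--         return False
--
--     pts = [tuple(map(int, c)) for c in cells]
--
--     def adjacent(p, q):
--         # FCC neighbour, arithmetically: a step of L1-length 1, or of L1-length 2
--         # whose coordinates sum to 0 (the six (+1,-1) mixed steps). Symmetric in p,q.
--         dx, dy, dz = q[0] - p[0], q[1] - p[1], q[2] - p[2]
--         s = abs(dx) + abs(dy) + abs(dz)
--         return s == 1 or (s == 2 and dx + dy + dz == 0)
--
--     # symmetric boolean adjacency matrix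
--     edge = [[False] * 4 for _ in range(4)]
--     for i in range(4):
--         for j in range(i + 1, 4):
--             if adjacent(pts[i], pts[j]):
--                 edge[i][j] = edge[j][i] = True
--
--     # reachability from node 0 by three relaxation passes (diameter of a
--     # connected 4-node graph is at most 3)
--     reached = [True, False, False, False]
--     for _ in range(3):
--         reached = [reached[k] or any(reached[m] and edge[m][k] for m in range(4))
--                    for k in range(4)]
--     return all(reached)
-- ===== Notes on version B (the rewrite author's own statement) =====
-- stated objective: alternative
-- what changed: Replaces the neighbour-offset set plus adjacency-dict plus explicit-stack DFS with an arithmetic adjacency test (L1-norm closed form), a symmetric boolean matrix, and three relaxation passes computing reachability from node 0.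
import Mathlib
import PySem

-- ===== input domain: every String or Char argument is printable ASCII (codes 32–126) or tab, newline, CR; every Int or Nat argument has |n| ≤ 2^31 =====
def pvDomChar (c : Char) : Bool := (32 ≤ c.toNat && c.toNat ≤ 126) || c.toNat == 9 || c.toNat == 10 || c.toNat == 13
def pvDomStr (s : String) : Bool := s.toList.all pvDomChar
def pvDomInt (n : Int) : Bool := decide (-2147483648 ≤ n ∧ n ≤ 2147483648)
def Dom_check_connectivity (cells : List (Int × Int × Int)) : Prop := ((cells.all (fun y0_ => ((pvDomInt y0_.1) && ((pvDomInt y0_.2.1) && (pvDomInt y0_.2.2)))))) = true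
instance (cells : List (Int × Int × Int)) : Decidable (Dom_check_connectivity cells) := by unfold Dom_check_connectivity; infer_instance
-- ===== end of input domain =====

-- B replaces A's neighbour-offset set + adjacency-dict + stack DFS with an arithmetic
-- adjacency test, a symmetric boolean matrix and three relaxation passes from node 0:
-- alternative decomposition, same O(1)-size input, no speed claim.

-- ===== PORT A =====
-- the FCC neighbour set, built exactly as Python's set literal
def pvNeighborSetA : PySem.Set (Int × Int × Int) :=
  PySem.Set.ofList [(1, 0, 0), (-1, 0, 0), (0, 1, 0), (0, -1, 0), (0, 0, 1), (0, 0, -1),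
    (1, -1, 0), (-1, 1, 0), (1, 0, -1), (-1, 0, 1), (0, 1, -1), (0, -1, 1)]

-- A's edge test for a pair of points: (dx,dy,dz) in neighbor_set or (-dx,-dy,-dz) in neighbor_set
def pvEdgeA (p q : Int × Int × Int) : Bool :=
  let dx := q.1 - p.1
  let dy := q.2.1 - p.2.1
  let dz := q.2.2 - p.2.2
  pvNeighborSetA.contains (dx, dy, dz) || pvNeighborSetA.contains (-dx, -dy, -dz)

-- A's while-stack DFS; fuel 16 is a totality guard only (the loop runs at most 5 times:
-- each pop removes one stack entry and at most 4 entries are ever pushed)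
def pvDfsA (adj : PySem.Dict Int (List Int)) : Nat → PySem.Set Int → List Int → PySem.Set Int
  | 0, visited, _ => visited
  | _ + 1, visited, [] => visited
  | fuel + 1, visited, stack =>
      let node := stack.getLast?.getD 0          -- stack.pop()
      let stack' := stack.dropLast
      let st := (adj.getD node []).foldl
        (fun (vs : PySem.Set Int × List Int) n =>
          if vs.1.contains n then vs else (PySem.Set.add vs.1 n, vs.2 ++ [n]))
        (visited, stack')
      pvDfsA adj fuel st.1 st.2

def check_connectivity (cells : List (Int × Int × Int)) : Bool :=
  if cells.length ≠ 4 then false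
  else
    let pts := cells.map (fun c => ((c.1 : Int), (c.2.1 : Int), (c.2.2 : Int)))  -- tuple(map(int, c))
    let adj := (PySem.List.pyRange 0 4 1).foldl (fun adj i =>
        (PySem.List.pyRange (i + 1) 4 1).foldl (fun adj j =>
          if pvEdgeA ((PySem.List.pyGet? pts i).getD (0, 0, 0)) ((PySem.List.pyGet? pts j).getD (0, 0, 0)) then
            (adj.modify i [] (fun l => l ++ [j])).modify j [] (fun l => l ++ [i])
          else adj) adj)
      (PySem.Dict.ofList [(0, ([] : List Int)), (1, []), (2, []), (3, [])])
    (pvDfsA adj 16 (PySem.Set.ofList [0]) [0]).length == 4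

-- ===== PORT B =====
-- B's adjacent(p, q): |dx|+|dy|+|dz| == 1, or == 2 with dx+dy+dz == 0
def pvAdjacent (p q : Int × Int × Int) : Bool :=
  let dx := q.1 - p.1
  let dy := q.2.1 - p.2.1
  let dz := q.2.2 - p.2.2
  let s := dx.natAbs + dy.natAbs + dz.natAbs
  s == 1 || (s == 2 && dx + dy + dz == 0)

-- edge[i][j] = True on a list-of-lists matrix (indices are in range by construction)
def pvSetE (edge : List (List Bool)) (i j : Int) : List (List Bool) :=
  PySem.List.pySetD edge i (PySem.List.pySetD ((PySem.List.pyGet? edge i).getD []) j true)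

-- one relaxation pass: reached[k] or any(reached[m] and edge[m][k] for m in range(4))
def pvRelax (edge : List (List Bool)) (reached : List Bool) : List Bool :=
  (PySem.List.pyRange 0 4 1).map (fun k =>
    (PySem.List.pyGet? reached k).getD false ||
    (PySem.List.pyRange 0 4 1).any (fun m =>
      (PySem.List.pyGet? reached m).getD false &&
      ((PySem.List.pyGet? ((PySem.List.pyGet? edge m).getD []) k).getD false)))

def check_connectivity_alt (cells : List (Int × Int × Int)) : Bool :=
  if cells.length ≠ 4 then false
  else
    let pts := cells.map (fun c => ((c.1 : Int), (c.2.1 : Int), (c.2.2 : Int)))  -- tuple(map(int, c))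
    let edge := (PySem.List.pyRange 0 4 1).foldl (fun edge i =>
        (PySem.List.pyRange (i + 1) 4 1).foldl (fun edge j =>
          if pvAdjacent ((PySem.List.pyGet? pts i).getD (0, 0, 0)) ((PySem.List.pyGet? pts j).getD (0, 0, 0)) then
            pvSetE (pvSetE edge i j) j i
          else edge) edge)
      (List.replicate 4 (List.replicate 4 false))
    let reached := pvRelax edge (pvRelax edge (pvRelax edge [true, false, false, false]))
    reached.all id

-- ===== PRECONDITION & SPEC =====
def Spec_check_connectivity (cells : List (Int × Int × Int)) (out : Bool) : Prop := out = check_connectivity_alt cells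
instance (cells : List (Int × Int × Int)) (out : Bool) : Decidable (Spec_check_connectivity cells out) := by unfold Spec_check_connectivity; infer_instance

-- ===== CLAIM (what is proved, stated in full; the proofs are below) =====
def Claim_equal_check_connectivity : Prop := ∀ (cells : List (Int × Int × Int)), Dom_check_connectivity cells → Spec_check_connectivity cells (check_connectivity cells)

-- ===== LEMMAS AND PROOFS =====

-- The result of either program on [a,b,c,d] depends only on the six pairwise edge
-- booleans. pvTbl routes edge bit k to pair (i,j); the two cores repeat each port's
-- post-edge computation verbatim, so the bridge lemmas hold by rfl, and core-vs-core
-- is a finite check over Bool^6.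
def pvTbl (e1 e2 e3 e4 e5 e6 : Bool) (i j : Int) : Bool :=
  if i == 0 && j == 1 then e1 else if i == 0 && j == 2 then e2
  else if i == 0 && j == 3 then e3 else if i == 1 && j == 2 then e4
  else if i == 1 && j == 3 then e5 else if i == 2 && j == 3 then e6 else false

def pvAcore (e1 e2 e3 e4 e5 e6 : Bool) : Bool :=
  let adj := (PySem.List.pyRange 0 4 1).foldl (fun adj i =>
      (PySem.List.pyRange (i + 1) 4 1).foldl (fun adj j =>
        if pvTbl e1 e2 e3 e4 e5 e6 i j then
          (adj.modify i [] (fun l => l ++ [j])).modify j [] (fun l => l ++ [i])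
        else adj) adj)
    (PySem.Dict.ofList [(0, ([] : List Int)), (1, []), (2, []), (3, [])])
  (pvDfsA adj 16 (PySem.Set.ofList [0]) [0]).length == 4

def pvBcore (e1 e2 e3 e4 e5 e6 : Bool) : Bool :=
  let edge := (PySem.List.pyRange 0 4 1).foldl (fun edge i =>
      (PySem.List.pyRange (i + 1) 4 1).foldl (fun edge j =>
        if pvTbl e1 e2 e3 e4 e5 e6 i j then
          pvSetE (pvSetE edge i j) j i
        else edge) edge)
    (List.replicate 4 (List.replicate 4 false))
  let reached := pvRelax edge (pvRelax edge (pvRelax edge [true, false, false, false]))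
  reached.all id

-- A's symmetric set-membership test agrees with B's L1 closed form
lemma pvEdge_eq (p q : Int × Int × Int) : pvEdgeA p q = pvAdjacent p q := by
  rcases p with ⟨a, b, c⟩
  rcases q with ⟨d, e, f⟩
  simp only [pvEdgeA, pvAdjacent, pvNeighborSetA]
  generalize d - a = dx
  generalize e - b = dy
  generalize f - c = dz
  rw [Bool.eq_iff_iff]
  simp only [Bool.or_eq_true, Bool.and_eq_true, beq_iff_eq, PySem.Set.contains,
    PySem.Set.ofList, List.contains_eq_mem,
    decide_eq_true_eq]
  constructor
  · rintro (h | h) <;> simp_all <;> omega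
  · intro h
    have hx : dx = -1 ∨ dx = 0 ∨ dx = 1 := by omega
    have hy : dy = -1 ∨ dy = 0 ∨ dy = 1 := by omega
    have hz : dz = -1 ∨ dz = 0 ∨ dz = 1 := by omega
    rcases hx with hx | hx | hx <;> rcases hy with hy | hy | hy <;>
      rcases hz with hz | hz | hz <;> subst hx <;> subst hy <;> subst hz <;>
      simp_all

lemma pvBridgeA (a b c d : Int × Int × Int) :
    check_connectivity [a, b, c, d] =
      pvAcore (pvEdgeA a b) (pvEdgeA a c) (pvEdgeA a d) (pvEdgeA b c) (pvEdgeA b d) (pvEdgeA c d) := rfl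

lemma pvBridgeB (a b c d : Int × Int × Int) :
    check_connectivity_alt [a, b, c, d] =
      pvBcore (pvAdjacent a b) (pvAdjacent a c) (pvAdjacent a d) (pvAdjacent b c) (pvAdjacent b d) (pvAdjacent c d) := rfl

set_option maxRecDepth 100000 in
set_option maxHeartbeats 2000000 in
lemma pvCore_eq : ∀ e1 e2 e3 e4 e5 e6 : Bool,
    pvAcore e1 e2 e3 e4 e5 e6 = pvBcore e1 e2 e3 e4 e5 e6 := by decide

lemma pvLong (a b c d e : Int × Int × Int) (t : List (Int × Int × Int)) :
    check_connectivity (a :: b :: c :: d :: e :: t) = false ∧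
    check_connectivity_alt (a :: b :: c :: d :: e :: t) = false := by
  constructor <;>
  · simp only [check_connectivity, check_connectivity_alt, List.length_cons]
    rw [if_pos (by omega)]

-- ===== VERDICT (by name: the statement is the Claim_ definition above) =====
set_option maxHeartbeats 1000000 in
theorem check_connectivity_spec : Claim_equal_check_connectivity := by
  intro cells _
  unfold Spec_check_connectivity
  rcases cells with _ | ⟨a, _ | ⟨b, _ | ⟨c, _ | ⟨d, _ | ⟨e, t⟩⟩⟩⟩⟩
  · rfl
  · rfl
  · rfl
  · rfl
  · rw [pvBridgeA, pvBridgeB,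
      pvEdge_eq a b, pvEdge_eq a c, pvEdge_eq a d, pvEdge_eq b c, pvEdge_eq b d, pvEdge_eq c d]
    exact pvCore_eq _ _ _ _ _ _
  · rw [(pvLong a b c d e t).1, (pvLong a b c d e t).2]
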